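-- pv_equiv track=rewrite | github.com/Shivayetii/python | python/exercises/sets/set8/ex3.py | funDict
-- ===== SOURCE A (Python) =====
-- def funDict(org_Dict):
--         #define new dict
--         new_Dict={}
--         #itrates keys and values simantanously
--         for key,value in org_Dict.items():
--                 #loop for checking key is prime
--                 for k in range(2,key):
--                         #checking for co-factors if found any co-factors between these range loop will break
--                         if(key%k==0 or key<2):
--                           break
--                 else:
--                         #checking for value is prime
--                         for l in range(2,value):
--                                 #if found any co-factors between these range loop will break
--                                 if(value%l==0 or value<2):
--                                          break
--                         else:
--                                 #both key and value prime,so add to new dictionary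
--                                  new_Dict[key]=value
--          #finally return new dictionary
--         return new_Dict
-- ===== SOURCE B (Python) =====
-- def funDict(org_Dict):
--     # keep entries whose key and value both pass the primality test;
--     # trial division only up to sqrt(n) instead of scanning range(2, n)
--     def ok(n):
--         d = 2
--         while d * d <= n:
--             if n % d == 0:
--                 return False
--             d += 1
--         return True
--     return {k: v for k, v in org_Dict.items() if ok(k) and ok(v)}
-- ===== Notes on version B (the rewrite author's own statement) =====
-- stated objective: faster
-- what changed: Replaces A's trial division over all of range(2,n) for each key and value by trial division only up to sqrt(n) (while d*d<=n), and builds the result dict with a single comprehension instead of nested for-else loops.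
import Mathlib
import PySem

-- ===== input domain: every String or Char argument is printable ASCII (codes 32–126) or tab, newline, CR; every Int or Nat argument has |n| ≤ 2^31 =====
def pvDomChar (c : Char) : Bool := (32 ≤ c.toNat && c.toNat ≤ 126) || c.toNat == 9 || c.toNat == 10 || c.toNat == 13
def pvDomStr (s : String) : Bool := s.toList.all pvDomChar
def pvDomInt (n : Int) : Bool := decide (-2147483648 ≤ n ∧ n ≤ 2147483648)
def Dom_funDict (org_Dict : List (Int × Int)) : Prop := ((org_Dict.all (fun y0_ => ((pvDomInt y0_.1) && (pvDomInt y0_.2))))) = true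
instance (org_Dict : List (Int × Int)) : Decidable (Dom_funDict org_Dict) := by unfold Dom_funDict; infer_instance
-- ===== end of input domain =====

-- B replaces A's trial division over all of range(2, n) by trial division up to √n (while d*d <= n),
-- and builds the result with a single comprehension/filter instead of nested for-else loops.

-- ===== PORT A =====
def funDict (org_Dict : List (Int × Int)) : List (Int × Int) :=
  -- dict iteration: the association list (unique keys under Pre_) is the items() sequence
  (org_Dict.foldl
    (fun new_Dict kv =>
      let key := kv.1
      let value := kv.2
      -- for k in range(2, key): if key%k==0 or key<2: break  / else: …
      if (PySem.List.pyRange 2 key 1).any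
           (fun k => PySem.Int.mod key k == 0 || decide (key < 2)) then
        new_Dict
      else if (PySem.List.pyRange 2 value 1).any
           (fun l => PySem.Int.mod value l == 0 || decide (value < 2)) then
        new_Dict
      else
        new_Dict.insert key value)
    PySem.Dict.empty).items

-- ===== PORT B =====
-- the 'while d * d <= n' loop of Source B's ok(n)
def okLoop (n : Int) (d : Int) : Bool :=
  if h : d * d ≤ n then
    if hm : PySem.Int.mod n d == 0 then false
    else okLoop n (d + 1)
  else true
termination_by (n - d).toNat
decreasing_by
  have hd : d < n := by
    rcases (by omega : 2 ≤ d ∨ d = 1 ∨ d = 0 ∨ d < 0) with h2 | rfl | rfl | h2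
    · nlinarith
    · exact absurd (by simp) hm
    · have h0 : (0:Int) ≤ n := by nlinarith
      rcases eq_or_ne n 0 with rfl | hn
      · exact absurd (by simp [PySem.Int.mod_eq_zero_iff_dvd]) hm
      · omega
    · have := mul_self_nonneg d
      omega
  omega

def funDict_alt (org_Dict : List (Int × Int)) : List (Int × Int) :=
  org_Dict.filter (fun p => okLoop p.1 2 && okLoop p.2 2)

-- ===== PRECONDITION & SPEC =====
-- Pre_ : the association list represents a Python dict, so its keys are pairwise distinct;
-- a list with duplicate keys does not correspond to any dict input of A.
def Pre_funDict (org_Dict : List (Int × Int)) : Prop := (org_Dict.map Prod.fst).Nodup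
instance (org_Dict : List (Int × Int)) : Decidable (Pre_funDict org_Dict) := by unfold Pre_funDict; infer_instance
def pvWitness_funDict : (List (Int × Int)) := [(2, 7), (4, 5), (13, 1), (-3, 11)]
def Spec_funDict (org_Dict : List (Int × Int)) (out : List (Int × Int)) : Prop := out = funDict_alt org_Dict
instance (org_Dict : List (Int × Int)) (out : List (Int × Int)) : Decidable (Spec_funDict org_Dict out) := by unfold Spec_funDict; infer_instance

-- ===== CLAIM (what is proved, stated in full; the proofs are below) =====
def Claim_equal_funDict : Prop := ∀ (org_Dict : List (Int × Int)), Dom_funDict org_Dict → Pre_funDict org_Dict → Spec_funDict org_Dict (funDict org_Dict)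

-- ===== LEMMAS AND PROOFS =====

-- A's for-else scan accepts n iff no k in [2, n) divides n
theorem aScan_eq_false_iff (n : Int) :
    ((PySem.List.pyRange 2 n 1).any
      (fun k => PySem.Int.mod n k == 0 || decide (n < 2))) = false ↔
    ∀ k : Int, 2 ≤ k → k < n → ¬ k ∣ n := by
  rw [List.any_eq_false]
  constructor
  · intro h k h2 hk hdvd
    have hmem : k ∈ PySem.List.pyRange 2 n 1 := by
      rw [PySem.List.mem_pyRange_one]; omega
    have hk0 := h k hmem
    simp [PySem.Int.mod_eq_zero_iff_dvd] at hk0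
    exact hk0.1 hdvd
  · intro h k hmem
    rw [PySem.List.mem_pyRange_one] at hmem
    simp [PySem.Int.mod_eq_zero_iff_dvd]
    exact ⟨fun hd => h k hmem.1 hmem.2 hd, by omega⟩

-- B's loop from d ≥ 2 succeeds iff no e ≥ d with e*e ≤ n divides n
theorem okLoop_eq_true_iff (n : Int) :
    ∀ d : Int, 2 ≤ d →
      (okLoop n d = true ↔ ∀ e : Int, d ≤ e → e * e ≤ n → ¬ e ∣ n) := by
  have main : ∀ m : Nat, ∀ d : Int, (n - d).toNat = m → 2 ≤ d →
      (okLoop n d = true ↔ ∀ e : Int, d ≤ e → e * e ≤ n → ¬ e ∣ n) := by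
    intro m
    induction m using Nat.strong_induction_on with
    | _ m ih =>
      intro d hm h2
      rw [okLoop]
      by_cases h : d * d ≤ n
      · rw [dif_pos h]
        by_cases hdv : PySem.Int.mod n d == 0
        · rw [dif_pos hdv]
          have hdd : d ∣ n := by simpa [PySem.Int.mod_eq_zero_iff_dvd] using hdv
          simp only [Bool.false_eq_true, false_iff, not_forall]
          exact ⟨d, le_rfl, h, by simp [hdd]⟩
        · rw [dif_neg hdv]
          have hndvd : ¬ d ∣ n := by simpa [PySem.Int.mod_eq_zero_iff_dvd] using hdv
          have hdn : d < n := by nlinarith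
          rw [ih ((n - (d + 1)).toNat) (by omega) (d + 1) rfl (by omega)]
          constructor
          · intro h' e he hee hdvd
            rcases eq_or_lt_of_le he with rfl | hlt
            · exact hndvd hdvd
            · exact h' e (by omega) hee hdvd
          · intro h' e he hee hdvd
            exact h' e (by omega) hee hdvd
      · rw [dif_neg h]
        simp only [true_iff]
        intro e he hee hdvd
        exact h (by nlinarith)
  exact fun d h2 => main ((n - d).toNat) d rfl h2

-- the two acceptance tests agree
theorem accept_agree (n : Int) :
    (!((PySem.List.pyRange 2 n 1).any
        (fun k => PySem.Int.mod n k == 0 || decide (n < 2)))) = okLoop n 2 := by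
  cases hs : ((PySem.List.pyRange 2 n 1).any
      (fun k => PySem.Int.mod n k == 0 || decide (n < 2))) with
  | false =>
    have hA := (aScan_eq_false_iff n).mp hs
    have hB : okLoop n 2 = true := by
      rw [okLoop_eq_true_iff n 2 le_rfl]
      intro e he hee hdvd
      exact hA e he (by nlinarith) hdvd
    simp [hB]
  | true =>
    have hB : okLoop n 2 = false := by
      rw [Bool.eq_false_iff]
      intro htrue
      rw [okLoop_eq_true_iff n 2 le_rfl] at htrue
      have hfalse : ((PySem.List.pyRange 2 n 1).any
          (fun k => PySem.Int.mod n k == 0 || decide (n < 2))) = false := by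
        rw [aScan_eq_false_iff]
        intro k h2 hk hdvd
        obtain ⟨m, hnm⟩ := hdvd
        by_cases hkk : k * k ≤ n
        · exact htrue k h2 hkk ⟨m, hnm⟩
        · have hm2 : 2 ≤ m := by nlinarith
          have hmlt : m < k := by nlinarith
          exact htrue m hm2 (by nlinarith) ⟨k, by rw [hnm]; ring⟩
      rw [hs] at hfalse
      exact absurd hfalse (by simp)
    simp [hB]

-- conditional-insert fold over fresh distinct keys is a filter
theorem items_foldl_condInsert (c1 c2 : Int × Int → Bool) :
    ∀ (l : List (Int × Int)) (d : PySem.Dict Int Int),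
      (d.keys ++ l.map Prod.fst).Nodup →
      (l.foldl
        (fun d p => if c1 p then d else if c2 p then d else d.insert p.1 p.2) d).items
        = d.items ++ l.filter (fun p => !c1 p && !c2 p) := by
  intro l
  induction l with
  | nil => intro d h; simp
  | cons p l ih =>
    intro d h
    rw [List.map_cons] at h
    rcases List.nodup_append.mp h with ⟨hk, hpl, hdisj⟩
    rcases List.nodup_cons.mp hpl with ⟨hpnotl, hlnd⟩
    rw [List.foldl_cons, List.filter_cons]
    by_cases h1 : c1 p
    · rw [if_pos h1]
      rw [ih d (List.nodup_append.mpr ⟨hk, hlnd,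
        fun a ha b hb => hdisj a ha b (List.mem_cons_of_mem _ hb)⟩)]
      simp [h1]
    · rw [if_neg h1]
      by_cases h2c : c2 p
      · rw [if_pos h2c]
        rw [ih d (List.nodup_append.mpr ⟨hk, hlnd,
          fun a ha b hb => hdisj a ha b (List.mem_cons_of_mem _ hb)⟩)]
        simp [h1, h2c]
      · rw [if_neg h2c]
        have hnotin : d.contains p.1 = false := by
          rw [PySem.Dict.contains_eq_decide_mem_keys]
          simp only [decide_eq_false_iff_not]
          intro hmem
          exact hdisj p.1 hmem p.1 (by simp) rfl
        have hkeys : (d.insert p.1 p.2).keys = d.keys ++ [p.1] :=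
          PySem.Dict.keys_insert_of_not_contains _ _ hnotin
        have hnd' : ((d.insert p.1 p.2).keys ++ l.map Prod.fst).Nodup := by
          rw [hkeys, List.append_assoc]
          simpa using h
        rw [ih _ hnd', PySem.Dict.items_insert_of_not_contains _ _ hnotin]
        simp [h1, h2c]

-- ===== VERDICT (by name: the statement is the Claim_ definition above) =====
theorem funDict_spec : Claim_equal_funDict := by
  intro org _hdom hpre
  unfold Spec_funDict funDict funDict_alt
  show (org.foldl
      (fun d p =>
        if (PySem.List.pyRange 2 p.1 1).any
            (fun k => PySem.Int.mod p.1 k == 0 || decide (p.1 < 2)) then d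
        else if (PySem.List.pyRange 2 p.2 1).any
            (fun l => PySem.Int.mod p.2 l == 0 || decide (p.2 < 2)) then d
        else d.insert p.1 p.2) PySem.Dict.empty).items = _
  rw [items_foldl_condInsert _ _ org PySem.Dict.empty (by simpa using hpre)]
  have hempty : (PySem.Dict.empty : PySem.Dict Int Int).items = [] := rfl
  rw [hempty, List.nil_append]
  apply List.filter_congr
  intro p _
  rw [accept_agree p.1, accept_agree p.2]
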